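-- pv_equiv track=rewrite | github.com/EricSchles/investigator | app/visualize_metrics.py | order_day_hour
-- ===== SOURCE A (Python) =====
-- from collections import OrderedDict
--
-- def order_day_hour(vals):
--     dicter = OrderedDict({})
--     dicter["Monday"] = []
--     dicter["Tuesday"] = []
--     dicter["Wednesday"] = []
--     dicter["Thursday"] = []
--     dicter["Friday"] = []
--     dicter["Saturday"] = []
--     dicter["Sunday"] = []
--     for val in vals:
--         dicter[val[0]].append(val)
--     for day in dicter.keys():
--         dicter[day] = sorted(dicter[day], key=lambda t:t[1])
--     x_vals = []
--     for key in dicter.keys():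
--         x_vals += dicter[key]
--     return x_vals
-- ===== SOURCE B (Python) =====
-- def order_day_hour(vals):
--     day_index = {"Monday": 0, "Tuesday": 1, "Wednesday": 2, "Thursday": 3,
--                  "Friday": 4, "Saturday": 5, "Sunday": 6}
--     return sorted(vals, key=lambda t: (day_index[t[0]], t[1]))
-- ===== Notes on version B (the rewrite author's own statement) =====
-- stated objective: simpler
-- what changed: Replaces the seven explicit day buckets, the per-bucket sort and the concatenation loop with a single stable sort of the whole list keyed lexicographically by (weekday rank, hour).
import Mathlib
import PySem

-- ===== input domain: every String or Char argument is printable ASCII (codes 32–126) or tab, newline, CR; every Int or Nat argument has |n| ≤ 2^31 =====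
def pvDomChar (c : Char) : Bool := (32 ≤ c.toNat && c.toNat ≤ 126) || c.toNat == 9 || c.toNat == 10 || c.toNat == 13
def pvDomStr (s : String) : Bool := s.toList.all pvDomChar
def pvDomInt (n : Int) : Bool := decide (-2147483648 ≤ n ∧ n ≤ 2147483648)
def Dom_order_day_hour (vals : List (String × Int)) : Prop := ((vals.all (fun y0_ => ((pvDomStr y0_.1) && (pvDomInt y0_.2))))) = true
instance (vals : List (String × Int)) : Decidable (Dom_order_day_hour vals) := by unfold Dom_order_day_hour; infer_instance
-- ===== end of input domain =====

-- B replaces A's seven explicit weekday buckets + per-bucket sort + concatenation by ONE stable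
-- sort keyed lexicographically by (weekday rank, hour); same cost, simpler code.


-- ===== PORT A =====
-- 'dicter[val[0]].append(val)' raises KeyError on a weekday name not among the seven; those
-- inputs are outside Pre_ below. (Dict.modify with default [] would instead create the key —
-- irrelevant inside Pre_, where every key is present.)
def order_day_hour (vals : List (String × Int)) : List (String × Int) :=
  let dicter : PySem.Dict String (List (String × Int)) := PySem.Dict.mk []
  let dicter := dicter.insert "Monday" []
  let dicter := dicter.insert "Tuesday" []
  let dicter := dicter.insert "Wednesday" []
  let dicter := dicter.insert "Thursday" []
  let dicter := dicter.insert "Friday" []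
  let dicter := dicter.insert "Saturday" []
  let dicter := dicter.insert "Sunday" []
  let dicter := vals.foldl (fun d val => d.modify val.1 [] (fun l => l ++ [val])) dicter
  let dicter := dicter.keys.foldl
    (fun d day => d.insert day (PySem.List.sorted (d.getD day []) (fun t => t.2))) dicter
  dicter.keys.foldl (fun x_vals key => x_vals ++ dicter.getD key []) []

-- ===== PORT B =====
-- Source B's dict literal day_index, as an insertion-ordered Dict.
def pvDayIndex : PySem.Dict String Int :=
  PySem.Dict.mk [("Monday", 0), ("Tuesday", 1), ("Wednesday", 2), ("Thursday", 3),
                 ("Friday", 4), ("Saturday", 5), ("Sunday", 6)]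

-- 'day_index[t[0]]' raises KeyError on other strings (outside Pre_); the port defaults to 7 there.
def order_day_hour_alt (vals : List (String × Int)) : List (String × Int) :=
  PySem.List.sorted2 vals (fun t => (pvDayIndex.get? t.1).getD 7) (fun t => t.2)

-- ===== PRECONDITION & SPEC =====
def pvDays : List String :=
  ["Monday", "Tuesday", "Wednesday", "Thursday", "Friday", "Saturday", "Sunday"]

-- Pre_ excludes exactly the inputs containing a first component that is not one of the seven
-- weekday names: there BOTH Pythons raise KeyError.
def Pre_order_day_hour (vals : List (String × Int)) : Prop := ∀ v ∈ vals, v.1 ∈ pvDays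
instance (vals : List (String × Int)) : Decidable (Pre_order_day_hour vals) := by
  unfold Pre_order_day_hour; infer_instance

def pvWitness_order_day_hour : (List (String × Int)) :=
  [("Sunday", 3), ("Monday", 2), ("Monday", -1), ("Sunday", 3)]

def Spec_order_day_hour (vals : List (String × Int)) (out : List (String × Int)) : Prop := out = order_day_hour_alt vals
instance (vals : List (String × Int)) (out : List (String × Int)) : Decidable (Spec_order_day_hour vals out) := by unfold Spec_order_day_hour; infer_instance

-- ===== CLAIM (what is proved, stated in full; the proofs are below) =====
def Claim_equal_order_day_hour : Prop := ∀ (vals : List (String × Int)), Dom_order_day_hour vals → Pre_order_day_hour vals → Spec_order_day_hour vals (order_day_hour vals)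

-- ===== LEMMAS AND PROOFS =====

-- the rank key B sorts by
def pvRank (s : String) : Int := (pvDayIndex.get? s).getD 7
-- hour comparison (the per-bucket sort key) and B's lexicographic comparison
def pvBefH (a b : String × Int) : Bool := decide (a.2 < b.2)
def pvBef2 (a b : String × Int) : Bool :=
  decide (pvRank a.1 < pvRank b.1) || (!decide (pvRank b.1 < pvRank a.1) && decide (a.2 < b.2))
-- A's bucket for day d, and its sort
def pvFilt (vals : List (String × Int)) (d : String) : List (String × Int) :=
  vals.filter (fun v => v.1 == d)
def pvSortH (l : List (String × Int)) : List (String × Int) :=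
  PySem.List.sorted l (fun t => t.2)

lemma pvAlt_eq_foldl (vals : List (String × Int)) :
    order_day_hour_alt vals = vals.foldl (fun acc x => PySem.List.insertBy pvBef2 x acc) [] := rfl

lemma pvSortH_eq_foldl (l : List (String × Int)) :
    pvSortH l = l.foldl (fun acc x => PySem.List.insertBy pvBefH x acc) [] := by
  simpa [pvSortH, pvBefH] using
    PySem.List.sorted_eq_foldl_insertBy l (fun t : String × Int => t.2)

lemma pvIns_skip (before : (String × Int) → (String × Int) → Bool) (x : String × Int) :
    ∀ (L1 rest : List (String × Int)), (∀ y ∈ L1, before x y = false) →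
      PySem.List.insertBy before x (L1 ++ rest) = L1 ++ PySem.List.insertBy before x rest := by
  intro L1
  induction L1 with
  | nil => intro rest _; simp
  | cons a L ih =>
      intro rest h
      have ha := h a (by simp)
      simp [PySem.List.insertBy, ha]
      exact ih rest (fun y hy => h y (by simp [hy]))

lemma pvIns_split (before b2 : (String × Int) → (String × Int) → Bool) (x : String × Int) :
    ∀ (G L2 : List (String × Int)), (∀ y ∈ G, before x y = b2 x y) →
      (∀ y ∈ L2, before x y = true) →
      PySem.List.insertBy before x (G ++ L2) = PySem.List.insertBy b2 x G ++ L2 := by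
  intro G
  induction G with
  | nil =>
      intro L2 _ h2
      cases L2 with
      | nil => simp [PySem.List.insertBy]
      | cons z zs => simp [PySem.List.insertBy, h2 z (by simp)]
  | cons a G ih =>
      intro L2 h1 h2
      have ha := h1 a (by simp)
      by_cases hb : b2 x a = true
      · simp [PySem.List.insertBy, ha, hb]
      · have hb' : b2 x a = false := by simpa using hb
        simp [PySem.List.insertBy, ha, hb']
        exact ih L2 (fun y hy => h1 y (by simp [hy])) h2

lemma pvInsert_flatMap :
    ∀ (ds : List String) (g : String → List (String × Int)) (x : String × Int),
      (∀ d y, y ∈ g d → y.1 = d) → x.1 ∈ ds →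
      ds.Pairwise (fun a b => pvRank a < pvRank b) →
      PySem.List.insertBy pvBef2 x (ds.flatMap g) =
        ds.flatMap (fun d => if d = x.1 then PySem.List.insertBy pvBefH x (g d) else g d) := by
  intro ds
  induction ds with
  | nil => intro g x _ hx _; simp at hx
  | cons d ds ih =>
      intro g x hg hx hp
      have hpd : ∀ d' ∈ ds, pvRank d < pvRank d' := (List.pairwise_cons.mp hp).1
      have hpt : ds.Pairwise (fun a b => pvRank a < pvRank b) := (List.pairwise_cons.mp hp).2
      by_cases hd : d = x.1
      · have hG : ∀ y ∈ g d, pvBef2 x y = pvBefH x y := by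
          intro y hy
          have hy1 : y.1 = d := hg d y hy
          rw [hd] at hy1
          simp [pvBef2, pvBefH, hy1]
        have hL2 : ∀ y ∈ List.flatMap g ds, pvBef2 x y = true := by
          intro y hy
          rcases List.mem_flatMap.mp hy with ⟨d', hd', hyg⟩
          have hy1 : y.1 = d' := hg d' y hyg
          have hlt : pvRank d < pvRank d' := hpd d' hd'
          rw [hd] at hlt
          simp [pvBef2, hy1, hlt]
        have hne : ∀ d' ∈ ds, ¬ (d' = x.1) := by
          intro d' hd' he
          have hlt : pvRank d < pvRank d' := hpd d' hd'
          rw [hd] at hlt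
          rw [he] at hlt
          exact lt_irrefl _ hlt
        rw [List.flatMap_cons, List.flatMap_cons,
          pvIns_split pvBef2 pvBefH x (g d) (List.flatMap g ds) hG hL2, if_pos hd]
        congr 1
        exact (List.flatMap_congr (fun d' hd' => by rw [if_neg (hne d' hd')])).symm
      · have hx' : x.1 ∈ ds := by
          rcases List.mem_cons.mp hx with h | h
          · exact absurd h.symm hd
          · exact h
        have hrdx : pvRank d < pvRank x.1 := hpd _ hx'
        have hL1 : ∀ y ∈ g d, pvBef2 x y = false := by
          intro y hy
          have hy1 : y.1 = d := hg d y hy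
          have h1 : ¬ pvRank x.1 < pvRank d := not_lt.mpr (le_of_lt hrdx)
          simp [pvBef2, hy1, h1, hrdx]
        rw [List.flatMap_cons, List.flatMap_cons,
          pvIns_skip pvBef2 x (g d) (List.flatMap g ds) hL1, if_neg hd,
          ih g x hg hx' hpt]

lemma pvSorted2_eq_flatMap :
    ∀ (vals : List (String × Int)), (∀ v ∈ vals, v.1 ∈ pvDays) →
      vals.foldl (fun acc x => PySem.List.insertBy pvBef2 x acc) [] =
        pvDays.flatMap (fun d => pvSortH (pvFilt vals d)) := by
  intro vals
  induction vals using List.reverseRecOn with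
  | nil => intro _; simp [pvFilt, pvSortH, pvDays]; rfl
  | append_singleton xs x ih =>
      intro h
      have hxs : ∀ v ∈ xs, v.1 ∈ pvDays := fun v hv => h v (by simp [hv])
      have hx : x.1 ∈ pvDays := h x (by simp)
      rw [List.foldl_append, List.foldl_cons, List.foldl_nil, ih hxs]
      rw [pvInsert_flatMap pvDays (fun d => pvSortH (pvFilt xs d)) x
        (by
          intro d y hy
          have hy' : y ∈ pvFilt xs d :=
            (PySem.List.mem_sorted (xs := pvFilt xs d)
              (key := fun t : String × Int => t.2) (rev := false) (x := y)).mp hy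
          have := List.mem_filter.mp hy'
          exact by simpa using this.2)
        hx (by decide)]
      apply List.flatMap_congr
      intro d _
      by_cases hd : d = x.1
      · rw [if_pos hd, hd]
        have hfe : pvFilt (xs ++ [x]) x.1 = pvFilt xs x.1 ++ [x] := by
          simp [pvFilt, List.filter_append]
        rw [hfe, pvSortH_eq_foldl, pvSortH_eq_foldl, List.foldl_append, List.foldl_cons,
          List.foldl_nil]
      · rw [if_neg hd]
        have hne : (x.1 == d) = false := beq_eq_false_iff_ne.mpr (fun he => hd he.symm)
        have hfe : pvFilt (xs ++ [x]) d = pvFilt xs d := by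
          simp [pvFilt, List.filter_append, hne]
        rw [hfe]

-- A-side proof helpers: the three stages of A's body, named so the rewrites have handles
def pvInit7 : PySem.Dict String (List (String × Int)) :=
  PySem.Dict.mk [("Monday", []), ("Tuesday", []), ("Wednesday", []), ("Thursday", []),
                 ("Friday", []), ("Saturday", []), ("Sunday", [])]
def pvD1 (vals : List (String × Int)) : PySem.Dict String (List (String × Int)) :=
  vals.foldl (fun d val => d.modify val.1 [] (fun l => l ++ [val])) pvInit7
def pvD2 (vals : List (String × Int)) : PySem.Dict String (List (String × Int)) :=
  (pvD1 vals).keys.foldl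
    (fun d day => d.insert day (PySem.List.sorted (d.getD day []) (fun t => t.2))) (pvD1 vals)

-- A's first loop on the concrete seven-bucket dict: bucket d collects vals filtered to day d
lemma pvBuild7 :
    ∀ (vals : List (String × Int)) (a b c d e f g : List (String × Int)),
      (∀ v ∈ vals, v.1 ∈ pvDays) →
      vals.foldl (fun dd val => dd.modify val.1 [] (fun l => l ++ [val]))
        (PySem.Dict.mk [("Monday", a), ("Tuesday", b), ("Wednesday", c), ("Thursday", d),
                        ("Friday", e), ("Saturday", f), ("Sunday", g)]) =
      PySem.Dict.mk [("Monday", a ++ pvFilt vals "Monday"), ("Tuesday", b ++ pvFilt vals "Tuesday"),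
                     ("Wednesday", c ++ pvFilt vals "Wednesday"), ("Thursday", d ++ pvFilt vals "Thursday"),
                     ("Friday", e ++ pvFilt vals "Friday"), ("Saturday", f ++ pvFilt vals "Saturday"),
                     ("Sunday", g ++ pvFilt vals "Sunday")] := by
  intro vals
  induction vals with
  | nil => intro a b c d e f g _; simp [pvFilt]
  | cons v vals ih =>
      intro a b c d e f g h
      obtain ⟨s, n⟩ := v
      have hs : s ∈ pvDays := by simpa using h (s, n) (by simp)
      have hrest : ∀ v ∈ vals, v.1 ∈ pvDays := fun v hv => h v (by simp [hv])
      rw [List.foldl_cons]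
      simp only [pvDays, List.mem_cons, List.not_mem_nil, or_false] at hs
      rcases hs with hs | hs | hs | hs | hs | hs | hs
      · subst hs
        show List.foldl (fun dd val => dd.modify val.1 [] fun l => l ++ [val])
          (PySem.Dict.mk [("Monday", a ++ [("Monday", n)]), ("Tuesday", b), ("Wednesday", c), ("Thursday", d), ("Friday", e), ("Saturday", f), ("Sunday", g)]) vals = _
        rw [ih _ _ _ _ _ _ _ hrest]
        simp [pvFilt, List.append_assoc]
      · subst hs
        show List.foldl (fun dd val => dd.modify val.1 [] fun l => l ++ [val])
          (PySem.Dict.mk [("Monday", a), ("Tuesday", b ++ [("Tuesday", n)]), ("Wednesday", c), ("Thursday", d), ("Friday", e), ("Saturday", f), ("Sunday", g)]) vals = _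
        rw [ih _ _ _ _ _ _ _ hrest]
        simp [pvFilt, List.append_assoc]
      · subst hs
        show List.foldl (fun dd val => dd.modify val.1 [] fun l => l ++ [val])
          (PySem.Dict.mk [("Monday", a), ("Tuesday", b), ("Wednesday", c ++ [("Wednesday", n)]), ("Thursday", d), ("Friday", e), ("Saturday", f), ("Sunday", g)]) vals = _
        rw [ih _ _ _ _ _ _ _ hrest]
        simp [pvFilt, List.append_assoc]
      · subst hs
        show List.foldl (fun dd val => dd.modify val.1 [] fun l => l ++ [val])
          (PySem.Dict.mk [("Monday", a), ("Tuesday", b), ("Wednesday", c), ("Thursday", d ++ [("Thursday", n)]), ("Friday", e), ("Saturday", f), ("Sunday", g)]) vals = _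
        rw [ih _ _ _ _ _ _ _ hrest]
        simp [pvFilt, List.append_assoc]
      · subst hs
        show List.foldl (fun dd val => dd.modify val.1 [] fun l => l ++ [val])
          (PySem.Dict.mk [("Monday", a), ("Tuesday", b), ("Wednesday", c), ("Thursday", d), ("Friday", e ++ [("Friday", n)]), ("Saturday", f), ("Sunday", g)]) vals = _
        rw [ih _ _ _ _ _ _ _ hrest]
        simp [pvFilt, List.append_assoc]
      · subst hs
        show List.foldl (fun dd val => dd.modify val.1 [] fun l => l ++ [val])
          (PySem.Dict.mk [("Monday", a), ("Tuesday", b), ("Wednesday", c), ("Thursday", d), ("Friday", e), ("Saturday", f ++ [("Saturday", n)]), ("Sunday", g)]) vals = _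
        rw [ih _ _ _ _ _ _ _ hrest]
        simp [pvFilt, List.append_assoc]
      · subst hs
        show List.foldl (fun dd val => dd.modify val.1 [] fun l => l ++ [val])
          (PySem.Dict.mk [("Monday", a), ("Tuesday", b), ("Wednesday", c), ("Thursday", d), ("Friday", e), ("Saturday", f), ("Sunday", g ++ [("Sunday", n)])]) vals = _
        rw [ih _ _ _ _ _ _ _ hrest]
        simp [pvFilt, List.append_assoc]

lemma pvA_eq_flatMap (vals : List (String × Int)) (h : ∀ v ∈ vals, v.1 ∈ pvDays) :
    order_day_hour vals = pvDays.flatMap (fun d => pvSortH (pvFilt vals d)) := by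
  have h0 : order_day_hour vals =
      (pvD2 vals).keys.foldl (fun x_vals key => x_vals ++ (pvD2 vals).getD key []) [] := rfl
  have hD1 : pvD1 vals =
      PySem.Dict.mk [("Monday", pvFilt vals "Monday"), ("Tuesday", pvFilt vals "Tuesday"),
        ("Wednesday", pvFilt vals "Wednesday"), ("Thursday", pvFilt vals "Thursday"),
        ("Friday", pvFilt vals "Friday"), ("Saturday", pvFilt vals "Saturday"),
        ("Sunday", pvFilt vals "Sunday")] := by
    have := pvBuild7 vals [] [] [] [] [] [] [] h
    simpa [pvD1, pvInit7] using this
  have hD2 : pvD2 vals =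
      PySem.Dict.mk [("Monday", pvSortH (pvFilt vals "Monday")),
        ("Tuesday", pvSortH (pvFilt vals "Tuesday")),
        ("Wednesday", pvSortH (pvFilt vals "Wednesday")),
        ("Thursday", pvSortH (pvFilt vals "Thursday")),
        ("Friday", pvSortH (pvFilt vals "Friday")),
        ("Saturday", pvSortH (pvFilt vals "Saturday")),
        ("Sunday", pvSortH (pvFilt vals "Sunday"))] := by
    unfold pvD2
    rw [hD1]
    simp [PySem.Dict.keys, PySem.Dict.insert, PySem.Dict.contains, PySem.Dict.getD,
      PySem.Dict.get?, pvSortH]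
  rw [h0, hD2]
  simp [PySem.Dict.keys, PySem.Dict.getD, PySem.Dict.get?, pvDays]

-- ===== VERDICT (by name: the statement is the Claim_ definition above) =====
theorem order_day_hour_spec : Claim_equal_order_day_hour := by
  intro vals _ hpre
  unfold Spec_order_day_hour
  show order_day_hour vals = order_day_hour_alt vals
  rw [pvAlt_eq_foldl, pvSorted2_eq_flatMap vals hpre, pvA_eq_flatMap vals hpre]
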